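-- pv_equiv track=rewrite | github.com/ramin153/introduction-bioinformatic | q19.py | path_to_k
-- ===== SOURCE A (Python) =====
-- def path_to_k(tree,now,k):
--     for i in range(len(tree)):
--
--         item = tree[i]
--         if item[0] == now or item[1] == now:
--             if item[0] == k or item[1] == k:
--                 return True,[item]
--             help_item =  item[:2]
--             help_now =  help_item[ help_item.index(now) -1 ]
--             isT , save = path_to_k(tree[:i]+ tree[i+1:] , help_now, k)
--             if isT:
--                 return True, save + [item]
--     return False,None
-- ===== SOURCE B (Python) =====
-- def path_to_k(tree, now, k):
--     # Iterative DFS with an explicit frame stack and a reusable used-edge array,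
--     # replacing A's recursion and per-call list slicing.
--     n = len(tree)
--     used = [False] * n
--     stack = [[now, 0, None]]  # frame: [current node, next edge index to try, index of edge used to enter]
--     while stack:
--         node, i, entry = stack[-1]
--         if i >= n:
--             stack.pop()
--             if entry is not None:
--                 used[entry] = False
--             continue
--         stack[-1][1] = i + 1
--         if used[i]:
--             continue
--         e = tree[i]
--         if e[0] != node and e[1] != node:
--             continue
--         if e[0] == k or e[1] == k:
--             path = [e]
--             for frame in reversed(stack):
--                 if frame[2] is not None:
--                     path.append(tree[frame[2]])
--             return True, path
--         used[i] = True
--         stack.append([e[1] if e[0] == node else e[0], 0, i])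
--     return False, None
-- ===== Notes on version B (the rewrite author's own statement) =====
-- stated objective: alternative
-- what changed: Replaced A's recursive backtracking DFS, which rebuilds the edge list (tree[:i]+tree[i+1:]) on every descend, by an iterative DFS driven by an explicit stack of frames (node, next-edge-index, entry-edge) over a reusable used-edge boolean array, assembling the path from the frame stack on success.
-- outside the precondition, e.g. on path_to_k([[0, 5], [3]], 0, 5): A returns (True, [[0, 5]]), B returns (True, [[0, 5]])
import Mathlib
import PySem

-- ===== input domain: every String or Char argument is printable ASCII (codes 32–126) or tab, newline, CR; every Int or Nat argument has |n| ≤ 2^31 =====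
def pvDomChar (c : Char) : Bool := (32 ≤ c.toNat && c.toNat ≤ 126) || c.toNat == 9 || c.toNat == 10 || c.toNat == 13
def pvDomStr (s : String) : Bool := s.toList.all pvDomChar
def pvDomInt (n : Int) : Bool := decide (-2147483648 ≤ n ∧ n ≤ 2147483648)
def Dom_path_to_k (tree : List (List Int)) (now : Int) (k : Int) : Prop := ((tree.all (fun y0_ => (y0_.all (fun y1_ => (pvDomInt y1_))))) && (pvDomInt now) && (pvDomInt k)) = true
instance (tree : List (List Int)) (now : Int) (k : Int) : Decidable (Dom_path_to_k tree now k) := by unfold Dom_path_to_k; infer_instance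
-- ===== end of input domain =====

-- B replaces A's recursive DFS (which copies the edge list on every descend) by an iterative
-- DFS over an explicit frame stack with a reusable used-edge array; equivalence of the return
-- value is proved on Pre_ (every edge has at least 2 endpoints).

-- ===== PORT A =====
-- A's recursive DFS: scan edges from index i; on a descend, recurse on the tree with edge i removed.
def loopA (tree : List (List Int)) (now : Int) (k : Int) (i : Nat) : Bool × Option (List (List Int)) :=
  if h : i < tree.length then
    match tree.getD i [] with
    | a :: b :: _ =>
      if a = now ∨ b = now then
        if a = k ∨ b = k then (true, some [tree.getD i []])
        else
          -- help_now = item[:2][item[:2].index(now) - 1] : the other endpoint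
          let r := loopA (tree.take i ++ tree.drop (i+1)) (if a = now then b else a) k 0
          if r.1 then (true, some (r.2.getD [] ++ [tree.getD i []]))
          else loopA tree now k (i+1)
      else loopA tree now k (i+1)
    | _ => (false, none)  -- Python raises IndexError on an edge shorter than 2; excluded by Pre_
  else (false, none)
termination_by (tree.length, tree.length - i)
decreasing_by
  · apply Prod.Lex.left
    simp [List.length_take, List.length_drop]
    omega
  · apply Prod.Lex.right' <;> omega
  · apply Prod.Lex.right' <;> omega

def path_to_k (tree : List (List Int)) (now : Int) (k : Int) : Bool × Option (List (List Int)) :=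
  loopA tree now k 0

-- ===== PORT B =====
def tailEdges (tree : List (List Int)) (s : List (Int × Nat × Option Nat)) : List (List Int) :=
  s.filterMap (fun f => f.2.2.map (fun j => tree.getD j []))

-- termination measure for the stack machine (cited by runB's decreasing_by)
def muAux (n : Nat) : Nat → List (Int × Nat × Option Nat) → Nat
  | _, [] => 0
  | E, f :: tl => (n + 1 - f.2.1) * (n + 3) ^ E + muAux n (E - 1) tl

def mu (n : Nat) (s : List (Int × Nat × Option Nat)) : Nat :=
  muAux n (n + 1) s.reverse + s.length

theorem muAux_append (n : Nat) (f : Int × Nat × Option Nat) :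
    ∀ (l : List (Int × Nat × Option Nat)) (E : Nat),
    muAux n E (l ++ [f]) = muAux n E l + (n + 1 - f.2.1) * (n + 3) ^ (E - l.length) := by
  intro l
  induction l with
  | nil => intro E; simp [muAux]
  | cons g tl ih =>
      intro E
      simp only [List.cons_append, muAux, ih (E - 1), List.length_cons]
      have hEq : E - 1 - tl.length = E - (tl.length + 1) := by omega
      rw [hEq]; omega

theorem mu_pop (n : Nat) (f : Int × Nat × Option Nat) (rest : List (Int × Nat × Option Nat)) :
    mu n rest < mu n (f :: rest) := by
  simp [mu, muAux_append]
  omega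

theorem mu_skip (n : Nat) (node : Int) (i : Nat) (ei : Option Nat)
    (rest : List (Int × Nat × Option Nat)) (hi : i < n) :
    mu n ((node, i + 1, ei) :: rest) < mu n ((node, i, ei) :: rest) := by
  simp [mu, muAux_append]
  have hpow : 0 < (n + 3) ^ (n + 1 - rest.length) := Nat.one_le_pow _ _ (by omega)
  have hmul := (Nat.mul_lt_mul_right hpow).mpr (show n + 1 - (i + 1) < n + 1 - i by omega)
  omega

theorem mu_push (n : Nat) (o node : Int) (i : Nat) (si ei : Option Nat)
    (rest : List (Int × Nat × Option Nat)) (hi : i < n) (hlen : rest.length + 1 ≤ n + 1) :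
    mu n ((o, 0, si) :: (node, i + 1, ei) :: rest) < mu n ((node, i, ei) :: rest) := by
  have hL : rest.length ≤ n := by omega
  simp only [mu, List.reverse_cons, List.append_assoc]
  rw [show rest.reverse ++ ([(node, i+1, ei)] ++ [(o, 0, si)]) = (rest.reverse ++ [(node, i+1, ei)]) ++ [(o, 0, si)] by simp,
      muAux_append, muAux_append, muAux_append]
  simp [List.length_append, List.length_reverse]
  have hE : n + 1 - rest.length = (n - rest.length) + 1 := by omega
  have hm : n + 1 - i = (n - i) + 1 := by omega
  rw [hE, hm, pow_succ]
  set x := (n + 3) ^ (n - rest.length) with hx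
  set m := n - i with hmm
  have hx1 : 1 ≤ x := Nat.one_le_pow _ _ (by omega)
  have key : (m + 1) * (x * (n + 3)) = m * (x * (n + 3)) + (n + 1) * x + 2 * x := by ring
  linarith [hx1, key]

def runB (tree : List (List Int)) (k : Int) (used : List Bool)
    (stack : List (Int × Nat × Option Nat)) : Bool × Option (List (List Int)) :=
  match stack with
  | [] => (false, none)
  | (node, i, entry) :: rest =>
    if hi : i < tree.length then
      if used.getD i false then runB tree k used ((node, i + 1, entry) :: rest)
      else
        match tree.getD i [] with
        | a :: b :: _ =>
          if a = node ∨ b = node then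
            if a = k ∨ b = k then
              (true, some (tree.getD i [] :: tailEdges tree ((node, i, entry) :: rest)))
            else if hlen : rest.length + 1 ≤ tree.length + 1 then
              runB tree k (used.set i true)
                (((if a = node then b else a), 0, some i) :: (node, i + 1, entry) :: rest)
            else (false, none)  -- unreachable termination guard: the stack never exceeds tree.length + 1 frames
          else runB tree k used ((node, i + 1, entry) :: rest)
        | _ => (false, none)  -- Python raises IndexError on an edge shorter than 2; excluded by Pre_
    else
      match entry with
      | some j => runB tree k (used.set j false) rest
      | none => runB tree k used rest
termination_by mu tree.length stack
decreasing_by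
  · exact mu_skip _ _ _ _ _ hi
  · exact mu_push _ _ _ _ _ _ _ hi hlen
  · exact mu_skip _ _ _ _ _ hi
  · exact mu_pop _ _ _
  · exact mu_pop _ _ _

def path_to_k_alt (tree : List (List Int)) (now : Int) (k : Int) : Bool × Option (List (List Int)) :=
  runB tree k (List.replicate tree.length false) [(now, 0, none)]

-- ===== PRECONDITION & SPEC =====
-- Pre_ excludes trees containing an edge with fewer than 2 endpoints: on those Python A raises
-- IndexError whenever such an edge is examined (A can still return when it never reaches one).
def Pre_path_to_k (tree : List (List Int)) (now : Int) (k : Int) : Prop :=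
  ∀ e ∈ tree, 2 ≤ e.length
instance (tree : List (List Int)) (now : Int) (k : Int) : Decidable (Pre_path_to_k tree now k) := by
  unfold Pre_path_to_k; infer_instance

def pvWitness_path_to_k : List (List Int) × Int × Int := ([[0, 1], [1, 2]], 0, 2)

def Spec_path_to_k (tree : List (List Int)) (now : Int) (k : Int) (out : Bool × Option (List (List Int))) : Prop := out = path_to_k_alt tree now k
instance (tree : List (List Int)) (now : Int) (k : Int) (out : Bool × Option (List (List Int))) : Decidable (Spec_path_to_k tree now k out) := by unfold Spec_path_to_k; infer_instance

-- ===== CLAIM (what is proved, stated in full; the proofs are below) =====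
def Claim_equal_path_to_k : Prop := ∀ (tree : List (List Int)) (now : Int) (k : Int), Dom_path_to_k tree now k → Pre_path_to_k tree now k → Spec_path_to_k tree now k (path_to_k tree now k)

-- ===== LEMMAS AND PROOFS =====

-- loopA only returns (false, none) or (true, some _)
theorem loopA_shape (tree : List (List Int)) (now k : Int) (i : Nat) :
    loopA tree now k i = (false, none) ∨ ∃ p, loopA tree now k i = (true, some p) := by
  fun_induction loopA tree now k i with
  | _ => first
      | (left; rfl)
      | (right; exact ⟨_, rfl⟩)
      | assumption

-- remaining (unused) edges of the tree, and the position of index i among them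
def remE : List (List Int) → List Bool → List (List Int)
  | e :: t, b :: u => if b then remE t u else e :: remE t u
  | _, _ => []

def posU : List Bool → Nat → Nat
  | b :: u, i + 1 => (if b then 0 else 1) + posU u i
  | _, _ => 0

theorem posU_zero (u : List Bool) : posU u 0 = 0 := by
  cases u <;> rfl

theorem remE_replicate (t : List (List Int)) : remE t (List.replicate t.length false) = t := by
  induction t with
  | nil => rfl
  | cons e t ih => simp [remE, List.replicate, ih]

theorem remE_length (t : List (List Int)) : ∀ u : List Bool, u.length = t.length →
    (remE t u).length = posU u t.length := by
  induction t with
  | nil => intro u h; simp at h; subst h; rfl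
  | cons e t ih =>
    intro u h
    cases u with
    | nil => simp at h
    | cons b u =>
      simp at h
      cases b <;> simp [remE, posU, ih u h] <;> omega

theorem posU_succ_true' : ∀ (u : List Bool) (i : Nat), u.getD i false = true →
    posU u (i + 1) = posU u i := by
  intro u
  induction u with
  | nil => intro i h; simp at h
  | cons b u ih =>
    intro i h
    cases i with
    | zero => simp at h; subst h; simp [posU, posU_zero]
    | succ i => simp at h; simp [posU, ih i h]

theorem posU_succ_false' : ∀ (u : List Bool) (i : Nat), i < u.length →
    u.getD i false = false → posU u (i + 1) = posU u i + 1 := by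
  intro u
  induction u with
  | nil => intro i h; simp at h
  | cons b u ih =>
    intro i hi h
    cases i with
    | zero => simp at h; subst h; simp [posU, posU_zero]
    | succ i => simp at h hi; simp [posU, ih i hi h]; omega

theorem remE_getD (t : List (List Int)) : ∀ (u : List Bool) (i : Nat), u.length = t.length →
    i < t.length → u.getD i false = false →
    (remE t u).getD (posU u i) [] = t.getD i [] := by
  induction t with
  | nil => intro u i _ hi; simp at hi
  | cons e t ih =>
    intro u i h hi hu
    cases u with
    | nil => simp at h
    | cons b u =>
      simp at h
      cases i with
      | zero => simp at hu; subst hu; simp [remE, posU_zero]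
      | succ i =>
        simp at hu hi
        have hp : 1 + posU u i = posU u i + 1 := Nat.add_comm _ _
        cases b with
        | true => simpa [remE, posU] using ih u i h hi hu
        | false => simp [remE, posU, hp]; simpa using ih u i h hi hu

theorem posU_lt (t : List (List Int)) : ∀ (u : List Bool) (i : Nat), u.length = t.length →
    i < t.length → u.getD i false = false → posU u i < (remE t u).length := by
  induction t with
  | nil => intro u i _ hi; simp at hi
  | cons e t ih =>
    intro u i h hi hu
    cases u with
    | nil => simp at h
    | cons b u =>
      simp at h
      cases i with
      | zero => simp at hu; subst hu; simp [remE, posU_zero]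
      | succ i =>
        simp at hu hi
        cases b with
        | true => simpa [remE, posU] using ih u i h hi hu
        | false => simp [remE, posU]; have := ih u i h hi hu; omega

theorem remE_set_true (t : List (List Int)) : ∀ (u : List Bool) (i : Nat), u.length = t.length →
    i < t.length → u.getD i false = false →
    (remE t u).take (posU u i) ++ (remE t u).drop (posU u i + 1) = remE t (u.set i true) := by
  induction t with
  | nil => intro u i _ hi; simp at hi
  | cons e t ih =>
    intro u i h hi hu
    cases u with
    | nil => simp at h
    | cons b u =>
      simp at h
      cases i with
      | zero => simp at hu; subst hu; simp [remE, posU_zero]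
      | succ i =>
        simp at hu hi
        have hp : 1 + posU u i = posU u i + 1 := Nat.add_comm _ _
        cases b with
        | true => simpa [remE, posU, List.set] using ih u i h hi hu
        | false =>
          simp [remE, posU, List.set, hp]
          simpa using ih u i h hi hu

theorem set_false_self (u : List Bool) (i : Nat) : u.getD i false = false →
    u.set i false = u := by
  induction u generalizing i with
  | nil => intro _; rfl
  | cons b u ih =>
    intro h
    cases i with
    | zero => simp at h; subst h; rfl
    | succ i => simp at h; simp [List.set, ih i h]

theorem count_set_true (u : List Bool) (i : Nat) : u.getD i false = false → i < u.length →
    (u.set i true).count true = u.count true + 1 := by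
  induction u generalizing i with
  | nil => intro _ h; simp at h
  | cons b u ih =>
    intro h hi
    cases i with
    | zero => simp at h; subst h; simp [List.count_cons]
    | succ i =>
      simp at h hi
      simp [List.count_cons, ih i h hi]
      omega

theorem count_set_false_ge (u : List Bool) (j : Nat) :
    u.count true ≤ (u.set j false).count true + 1 := by
  induction u generalizing j with
  | nil => simp
  | cons b u ih =>
    cases j with
    | zero => cases b <;> simp [List.count_cons] <;> omega
    | succ j => simp [List.count_cons, Nat.add_comm]; have := ih j; cases b <;> simp <;> omega

-- what the machine computes, expressed through A's loop on the remaining edges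
def exB (tree : List (List Int)) (k : Int) : List Bool → List (Int × Nat × Option Nat) → Bool × Option (List (List Int))
  | _, [] => (false, none)
  | u, f :: rest =>
    let r := loopA (remE tree u) f.1 k (posU u f.2.1)
    if r.1 then (true, some (r.2.getD [] ++ tailEdges tree (f :: rest)))
    else exB tree k (match f.2.2 with | some j => u.set j false | none => u) rest


theorem loopA_eq (t' : List (List Int)) (now k : Int) (p : Nat) (hp : p < t'.length) :
    loopA t' now k p =
      (match t'.getD p [] with
      | a :: b :: _ =>
        if a = now ∨ b = now then
          if a = k ∨ b = k then (true, some [t'.getD p []])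
          else
            (let r := loopA (t'.take p ++ t'.drop (p + 1)) (if a = now then b else a) k 0
             if r.1 then (true, some (r.2.getD [] ++ [t'.getD p []]))
             else loopA t' now k (p + 1))
        else loopA t' now k (p + 1)
      | _ => (false, none)) := by
  rw [loopA]
  simp only [dif_pos hp]

theorem loopA_end (t' : List (List Int)) (now k : Int) (p : Nat) (hp : ¬ p < t'.length) :
    loopA t' now k p = (false, none) := by
  rw [loopA]
  simp only [dif_neg hp]

theorem runB_eq_exB (tree : List (List Int)) (k : Int) :
    ∀ (used : List Bool) (stack : List (Int × Nat × Option Nat)),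
    (∀ e ∈ tree, 2 ≤ e.length) →
    used.length = tree.length →
    stack.length ≤ used.count true + 1 →
    (∀ f ∈ stack, f.2.1 ≤ tree.length) →
    runB tree k used stack = exB tree k used stack := by
  intro used stack
  fun_induction runB tree k used stack with
  | case1 => intro _ _ _ _; rfl
  | case2 used node i entry rest hi hused ih =>
    intro hpre hul hsl hfr
    have hfr' : ∀ f ∈ (node, i + 1, entry) :: rest, f.2.1 ≤ tree.length := by
      intro f hf
      rcases List.mem_cons.mp hf with hf | hf
      · subst hf; simp; omega
      · exact hfr f (List.mem_cons_of_mem _ hf)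
    rw [ih hpre hul (by simpa using hsl) hfr']
    simp only [exB, posU_succ_true' used i hused, tailEdges, List.filterMap_cons]
  | case3 used node i entry rest hi hused a b tl hitem hinc hgoal =>
    intro hpre hul hsl hfr
    have hu : used.getD i false = false := by simpa using hused
    have hp : posU used i < (remE tree used).length := posU_lt tree used i hul hi hu
    have hget : (remE tree used).getD (posU used i) [] = tree.getD i [] :=
      remE_getD tree used i hul hi hu
    simp only [exB]
    rw [loopA_eq _ _ _ _ hp, hget, hitem]
    simp [hinc, hgoal, hitem]
  | case4 used node i entry rest hi hused a b tl hitem hinc hgoal hlen ih =>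
    intro hpre hul hsl hfr
    have hu : used.getD i false = false := by simpa using hused
    have hiu : i < used.length := by omega
    have hp : posU used i < (remE tree used).length := posU_lt tree used i hul hi hu
    have hget : (remE tree used).getD (posU used i) [] = tree.getD i [] :=
      remE_getD tree used i hul hi hu
    have hdel : (remE tree used).take (posU used i) ++ (remE tree used).drop (posU used i + 1)
        = remE tree (used.set i true) := remE_set_true tree used i hul hi hu
    have hfr' : ∀ f ∈ ((if a = node then b else a), 0, some i) :: (node, i + 1, entry) :: rest,
        f.2.1 ≤ tree.length := by
      intro f hf
      rcases List.mem_cons.mp hf with hf | hf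
      · subst hf; simp
      · rcases List.mem_cons.mp hf with hf | hf
        · subst hf; simp; omega
        · exact hfr f (List.mem_cons_of_mem _ hf)
    have hsl' : (((if a = node then b else a), 0, some i) :: (node, i + 1, entry) :: rest).length
        ≤ List.count true (used.set i true) + 1 := by
      rw [count_set_true used i hu hiu]
      simp at hsl ⊢
      omega
    simp only [dite_eq_ite] at ih
    rw [ih hpre (by simp [hul]) hsl' hfr']
    simp only [exB]
    rw [loopA_eq _ _ _ _ hp, hget, hitem]
    simp only [hinc, if_pos, hgoal, if_neg, not_false_iff]
    rw [hdel, posU_zero]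
    rcases loopA_shape (remE tree (used.set i true)) (if a = node then b else a) k 0 with hsh | ⟨q, hsh⟩
    · rw [hsh]
      simp only [List.set_set, set_false_self used i hu]
      rw [posU_succ_false' used i hiu hu]
      simp only [exB, tailEdges, List.filterMap_cons]
      simp
    · rw [hsh]
      simp [tailEdges, List.filterMap_cons]
      simpa [List.getD] using hitem
  | case5 used node i entry rest hi hused a b tl hitem hinc hgoal hlen =>
    intro hpre hul hsl hfr
    exfalso
    have := List.count_le_length (l := used) (a := true)
    simp at hsl
    omega
  | case6 used node i entry rest hi hused a b tl hitem hninc ih =>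
    intro hpre hul hsl hfr
    have hu : used.getD i false = false := by simpa using hused
    have hiu : i < used.length := by omega
    have hp : posU used i < (remE tree used).length := posU_lt tree used i hul hi hu
    have hget : (remE tree used).getD (posU used i) [] = tree.getD i [] :=
      remE_getD tree used i hul hi hu
    have hfr' : ∀ f ∈ (node, i + 1, entry) :: rest, f.2.1 ≤ tree.length := by
      intro f hf
      rcases List.mem_cons.mp hf with hf | hf
      · subst hf; simp; omega
      · exact hfr f (List.mem_cons_of_mem _ hf)
    rw [ih hpre hul (by simpa using hsl) hfr']
    simp only [exB]
    rw [loopA_eq _ _ _ _ hp, hget, hitem]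
    rw [posU_succ_false' used i hiu hu]
    simp [hninc, exB, tailEdges, List.filterMap_cons]
  | case7 used node i entry rest hi hused hnomatch =>
    intro hpre hul hsl hfr
    exfalso
    have hmem : tree.getD i [] ∈ tree := by
      have hg : tree.getD i [] = tree[i] := List.getD_eq_getElem tree [] hi
      rw [hg]; exact List.getElem_mem hi
    have hlen2 := hpre _ hmem
    rcases h : tree.getD i [] with _ | ⟨x, xs⟩
    · rw [h] at hlen2; simp at hlen2
    · rcases xs with _ | ⟨y, t⟩
      · rw [h] at hlen2; simp at hlen2
      · exact hnomatch x y t h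
  | case8 used node i rest hi j ih =>
    intro hpre hul hsl hfr
    have hile : i ≤ tree.length := by
      have := hfr (node, i, some j) (List.mem_cons_self)
      simpa using this
    have hieq : i = tree.length := by omega
    have hcnt := count_set_false_ge used j
    have hsl' : rest.length ≤ List.count true (used.set j false) + 1 := by
      simp at hsl; omega
    rw [ih hpre (by simp [hul])  hsl'
      (fun f hf => hfr f (List.mem_cons_of_mem _ hf))]
    simp only [exB]
    have hpos : posU used i = (remE tree used).length := by
      rw [hieq, ← hul]
      rw [remE_length tree used hul, hul]
    rw [loopA_end _ _ _ _ (by rw [hpos]; omega)]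
    simp
  | case9 used node i rest hi ih =>
    intro hpre hul hsl hfr
    have hile : i ≤ tree.length := by
      have := hfr (node, i, none) (List.mem_cons_self)
      simpa using this
    have hieq : i = tree.length := by omega
    have hsl' : rest.length ≤ List.count true used + 1 := by
      simp at hsl; omega
    rw [ih hpre hul hsl' (fun f hf => hfr f (List.mem_cons_of_mem _ hf))]
    simp only [exB]
    have hpos : posU used i = (remE tree used).length := by
      rw [hieq, ← hul]
      rw [remE_length tree used hul, hul]
    rw [loopA_end _ _ _ _ (by rw [hpos]; omega)]
    simp

theorem main_eq (tree : List (List Int)) (now k : Int) (hpre : ∀ e ∈ tree, 2 ≤ e.length) :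
    path_to_k tree now k = path_to_k_alt tree now k := by
  unfold path_to_k path_to_k_alt
  rw [runB_eq_exB tree k _ _ hpre (by simp)
    (by simp [List.count_replicate])
    (by intro f hf; simp at hf; subst hf; simp)]
  simp only [exB, remE_replicate, posU_zero]
  rcases loopA_shape tree now k 0 with h | ⟨p, h⟩ <;> rw [h] <;> simp [exB, tailEdges]

-- ===== VERDICT (by name: the statement is the Claim_ definition above) =====
theorem path_to_k_spec : Claim_equal_path_to_k := by
  intro tree now k _hdom hpre
  unfold Spec_path_to_k
  exact main_eq tree now k hpre
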